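-- pv_equiv track=rewrite | github.com/Clavss/AdventofCode | src/year2023/day07/main.py | value_card_based
-- ===== SOURCE A (Python) =====
-- def card_value_with_jack(card: str):
--     cards = [*[str(n) for n in range(2, 10)], 'T', 'J', 'Q', 'K', 'A']
--     return cards.index(card)
--
-- def card_value_with_joker(card: str):
--     cards = ['J', *[str(n) for n in range(2, 10)], 'T', 'Q', 'K', 'A']
--     return cards.index(str(card))
--
-- def value_card_based(hand: str, joker=False) -> int:
--     res = 0
--
--     for index, card in enumerate(hand[::-1]):
--         if joker:
--             card_value = card_value_with_joker(card)
--         else: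
--             card_value = card_value_with_jack(card)
--         res += pow(13, index) * card_value
--
--     return res
-- ===== SOURCE B (Python) =====
-- _ORDER_JACK = "23456789TJQKA"
-- _ORDER_JOKER = "J23456789TQKA"
--
-- def value_card_based(hand: str, joker=False) -> int:
--     order = _ORDER_JOKER if joker else _ORDER_JACK
--     res = 0
--     for card in hand:
--         res = res * 13 + order.index(card)
--     return res
-- ===== Notes on version B (the rewrite author's own statement) =====
-- stated objective: simpler
-- what changed: B replaces A's reversed traversal with pow(13,index)*value summation by a forward single-pass Horner accumulation (res = res*13 + value), dropping the string reversal, enumerate and pow entirely.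
import Mathlib
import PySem

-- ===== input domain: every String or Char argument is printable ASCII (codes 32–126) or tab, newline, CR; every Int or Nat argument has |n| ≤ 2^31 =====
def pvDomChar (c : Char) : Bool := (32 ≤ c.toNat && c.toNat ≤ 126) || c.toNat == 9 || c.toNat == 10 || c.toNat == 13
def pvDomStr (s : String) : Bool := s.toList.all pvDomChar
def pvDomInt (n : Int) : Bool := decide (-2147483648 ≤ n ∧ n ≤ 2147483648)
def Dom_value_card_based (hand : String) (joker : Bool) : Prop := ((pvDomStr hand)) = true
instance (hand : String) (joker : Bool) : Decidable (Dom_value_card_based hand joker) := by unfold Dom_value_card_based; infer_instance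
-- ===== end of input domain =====

-- B rewrites A's reversed enumerate + pow(13,index) summation as a forward Horner accumulation (objective: simpler).

-- ===== PORT A =====
-- cards.index(card): PySem.List.index?; none = ValueError, excluded by Pre_ (getD 0 unused inside Pre_)
def cardsJack : List Char := ['2','3','4','5','6','7','8','9','T','J','Q','K','A']
def cardsJoker : List Char := ['J','2','3','4','5','6','7','8','9','T','Q','K','A']
def card_value_with_jack (card : Char) : Int := ((PySem.List.index? cardsJack card).getD 0 : Nat)
def card_value_with_joker (card : Char) : Int := ((PySem.List.index? cardsJoker card).getD 0 : Nat)

-- the 'for index, card in enumerate(hand[::-1])' loop, index and res as loop state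
def valueLoopA (joker : Bool) : List Char → Nat → Int → Int
  | [], _, res => res
  | card :: rest, index, res =>
    let card_value := if joker then card_value_with_joker card else card_value_with_jack card
    valueLoopA joker rest (index + 1) (res + 13 ^ index * card_value)

def value_card_based (hand : String) (joker : Bool) : Int :=
  valueLoopA joker hand.toList.reverse 0 0

-- ===== PORT B =====
def ordJack : List Char := ['2','3','4','5','6','7','8','9','T','J','Q','K','A']
def ordJoker : List Char := ['J','2','3','4','5','6','7','8','9','T','Q','K','A']

def value_card_based_alt (hand : String) (joker : Bool) : Int :=
  let order := if joker then ordJoker else ordJack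
  hand.toList.foldl (fun res card => res * 13 + ((PySem.List.index? order card).getD 0 : Nat)) 0

-- ===== PRECONDITION & SPEC =====
-- Pre_ excludes hands containing a character outside the 13 card symbols: there
-- list.index / str.index raises ValueError in both A and B.
def Pre_value_card_based (hand : String) (joker : Bool) : Prop :=
  (hand.toList.all (fun c => c ∈ cardsJack)) = true
instance (hand : String) (joker : Bool) : Decidable (Pre_value_card_based hand joker) := by
  unfold Pre_value_card_based; infer_instance

def pvWitness_value_card_based : String × Bool := ("32T3K", false)

def Spec_value_card_based (hand : String) (joker : Bool) (out : Int) : Prop := out = value_card_based_alt hand joker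
instance (hand : String) (joker : Bool) (out : Int) : Decidable (Spec_value_card_based hand joker out) := by unfold Spec_value_card_based; infer_instance

-- ===== CLAIM (what is proved, stated in full; the proofs are below) =====
def Claim_equal_value_card_based : Prop := ∀ (hand : String) (joker : Bool), Dom_value_card_based hand joker → Pre_value_card_based hand joker → Spec_value_card_based hand joker (value_card_based hand joker)

-- ===== LEMMAS AND PROOFS =====

-- the per-card value both programs use (on the SAME order list: ordJack = cardsJack, ordJoker = cardsJoker by rfl)
def cardVal (joker : Bool) (c : Char) : Int :=
  if joker then card_value_with_joker c else card_value_with_jack c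

lemma altStep (joker : Bool) (res : Int) (c : Char) :
    res * 13 + (((PySem.List.index? (if joker then ordJoker else ordJack) c).getD 0 : Nat) : Int)
      = res * 13 + cardVal joker c := by
  cases joker <;> simp [cardVal, card_value_with_jack, card_value_with_joker, ordJack, ordJoker,
    cardsJack, cardsJoker]

-- Horner value of a list, most-significant card first (= B's foldl from 0)
def horner (joker : Bool) (l : List Char) : Int :=
  l.foldl (fun res c => res * 13 + cardVal joker c) 0

lemma horner_snoc (joker : Bool) (l : List Char) (c : Char) :
    horner joker (l ++ [c]) = horner joker l * 13 + cardVal joker c := by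
  simp [horner, List.foldl_append]

lemma valueLoopA_eq (joker : Bool) :
    ∀ (ys : List Char) (i : Nat) (res : Int),
      valueLoopA joker ys i res = res + 13 ^ i * horner joker ys.reverse := by
  intro ys
  induction ys with
  | nil => intro i res; simp [valueLoopA, horner]
  | cons c rest ih =>
    intro i res
    simp only [valueLoopA, ih, List.reverse_cons, horner_snoc]
    show res + 13 ^ i * cardVal joker c + 13 ^ (i + 1) * horner joker rest.reverse
        = res + 13 ^ i * (horner joker rest.reverse * 13 + cardVal joker c)
    ring

lemma alt_eq_horner (hand : String) (joker : Bool) :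
    value_card_based_alt hand joker = horner joker hand.toList := by
  unfold value_card_based_alt horner
  induction hand.toList generalizing joker with
  | nil => simp
  | cons c rest ih =>
    simp only [List.foldl_cons]
    rw [show (0 : Int) * 13 + (((PySem.List.index? (if joker then ordJoker else ordJack) c).getD 0 : Nat) : Int)
          = (0 : Int) * 13 + cardVal joker c from altStep joker 0 c]
    -- both folds now start from the same accumulator with pointwise-equal step functions
    exact List.foldl_ext _ _ _ (fun res x _ => altStep joker res x)

-- ===== VERDICT (by name: the statement is the Claim_ definition above) =====
theorem value_card_based_spec : Claim_equal_value_card_based := by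
  intro hand joker _ _
  unfold Spec_value_card_based value_card_based
  rw [valueLoopA_eq, alt_eq_horner, List.reverse_reverse]
  simp
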